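-- pv_equiv track=rewrite | github.com/MuhammadAhmed-dev/DUAL-CIPHER-WITH-ATTACK-DEMO-MAIN | attack_simulation.py | known_plaintext_attack
-- ===== SOURCE A (Python) =====
-- def known_plaintext_attack(known_plaintext, ciphertext, key_length=10):
--     """Try to recover shift (Caesar) and repeating Vigenere key of length key_length.
--     Returns (shift_guess, key_string) or (None, None).
--     Assumes known_plaintext aligns with start of ciphertext segment provided.
--     """
--     known_plaintext = "".join(filter(str.isalpha, known_plaintext)).upper()
--     ciphertext = "".join(filter(str.isalpha, ciphertext)).upper()
--     if len(known_plaintext) == 0 or len(ciphertext) == 0: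
--         return (None, None)
--     n = min(len(known_plaintext), len(ciphertext))
--     combined_shifts = [ (ord(ciphertext[i]) - ord(known_plaintext[i])) % 26 for i in range(n) ]
--     for s_key_guess in range(26):
--         vig_shifts = [ (cs - s_key_guess) % 26 for cs in combined_shifts ]
--         if len(vig_shifts) < key_length*2:
--             continue
--         seg1 = vig_shifts[:key_length]
--         seg2 = vig_shifts[key_length:key_length*2]
--         if seg1 == seg2:
--             key = ''.join(chr(s + ord('A')) for s in seg1)
--             return (s_key_guess, key)
--     return (None, None)
-- ===== SOURCE B (Python) =====
-- def known_plaintext_attack(known_plaintext, ciphertext, key_length=10):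
--     """Recover (shift, key). The segment-match test is shift-invariant, so only
--     s=0 ever needs checking: one pass over the text instead of 26."""
--     pt = [c.upper() for c in known_plaintext if c.isalpha()]
--     ct = [c.upper() for c in ciphertext if c.isalpha()]
--     if not pt or not ct:
--         return (None, None)
--     combined = [(ord(c) - ord(p)) % 26 for p, c in zip(pt, ct)]
--     k = key_length
--     if len(combined) >= 2 * k and combined[:k] == combined[k:2 * k]:
--         return (0, ''.join(chr(s + ord('A')) for s in combined[:k]))
--     return (None, None)
-- ===== Notes on version B (the rewrite author's own statement) =====
-- stated objective: faster
-- what changed: The segment-equality test is invariant under the guessed shift, so B drops A's 26-iteration loop over shift guesses (each rebuilding a full shifted list) and checks the condition once at shift 0, building the shift list by zipping the two cleaned strings instead of indexing over range(min-length).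
import Mathlib
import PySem

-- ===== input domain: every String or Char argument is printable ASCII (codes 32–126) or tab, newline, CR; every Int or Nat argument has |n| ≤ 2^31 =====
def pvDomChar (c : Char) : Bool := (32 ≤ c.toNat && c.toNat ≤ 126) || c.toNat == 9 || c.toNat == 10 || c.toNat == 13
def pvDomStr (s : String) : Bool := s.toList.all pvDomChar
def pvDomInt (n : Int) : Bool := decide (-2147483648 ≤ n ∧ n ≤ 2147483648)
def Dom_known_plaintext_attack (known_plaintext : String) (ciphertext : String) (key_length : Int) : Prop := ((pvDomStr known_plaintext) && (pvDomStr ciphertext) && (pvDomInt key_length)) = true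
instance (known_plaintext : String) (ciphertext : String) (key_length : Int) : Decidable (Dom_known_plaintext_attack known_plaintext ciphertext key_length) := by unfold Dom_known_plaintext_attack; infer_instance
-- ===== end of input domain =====

-- B replaces A's 26-iteration shift loop by a single check at shift 0 (the segment
-- comparison is shift-invariant), building the shift list with zip instead of indexed range.

-- ===== PORT A =====
-- the 'for s_key_guess in range(26)' loop with its early return
def kpaLoop (combined : List Int) (key_length : Int) : List Int → Option Int × Option String
  | [] => (none, none)
  | s :: rest =>
    let vig := combined.map (fun cs => PySem.Int.mod (cs - s) 26)
    if (vig.length : Int) < key_length * 2 then kpaLoop combined key_length rest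
    else
      let seg1 := PySem.List.slice vig none (some key_length)
      let seg2 := PySem.List.slice vig (some key_length) (some (key_length * 2))
      if seg1 = seg2 then
        (some s, some (String.ofList (seg1.map (fun x => Char.ofNat (x + 65).toNat))))
      else kpaLoop combined key_length rest

def known_plaintext_attack (known_plaintext : String) (ciphertext : String) (key_length : Int) : Option Int × Option String :=
  let kp := PySem.Chars.upper (known_plaintext.toList.filter PySem.Chars.isalpha)
  let ct := PySem.Chars.upper (ciphertext.toList.filter PySem.Chars.isalpha)
  if kp.length = 0 ∨ ct.length = 0 then (none, none)
  else
    let n := min kp.length ct.length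
    let combined := (PySem.List.pyRange 0 (n : Int) 1).map (fun i =>
      PySem.Int.mod (((PySem.List.pyGetD ct i 'A').toNat : Int) - ((PySem.List.pyGetD kp i 'A').toNat : Int)) 26)
    kpaLoop combined key_length (PySem.List.pyRange 0 26 1)

-- ===== PORT B =====
def known_plaintext_attack_alt (known_plaintext : String) (ciphertext : String) (key_length : Int) : Option Int × Option String :=
  let pt := (known_plaintext.toList.filter PySem.Chars.isalpha).map PySem.Chars.upperChar
  let ct := (ciphertext.toList.filter PySem.Chars.isalpha).map PySem.Chars.upperChar
  if pt.isEmpty || ct.isEmpty then (none, none)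
  else
    let combined := (pt.zip ct).map (fun pc => PySem.Int.mod ((pc.2.toNat : Int) - (pc.1.toNat : Int)) 26)
    if (combined.length : Int) ≥ 2 * key_length ∧
        PySem.List.slice combined none (some key_length)
          = PySem.List.slice combined (some key_length) (some (2 * key_length)) then
      (some 0, some (String.ofList ((PySem.List.slice combined none (some key_length)).map
        (fun x => Char.ofNat (x + 65).toNat))))
    else (none, none)

-- ===== PRECONDITION & SPEC =====
def Spec_known_plaintext_attack (known_plaintext : String) (ciphertext : String) (key_length : Int) (out : Option Int × Option String) : Prop := out = known_plaintext_attack_alt known_plaintext ciphertext key_length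
instance (known_plaintext : String) (ciphertext : String) (key_length : Int) (out : Option Int × Option String) : Decidable (Spec_known_plaintext_attack known_plaintext ciphertext key_length out) := by unfold Spec_known_plaintext_attack; infer_instance

-- ===== CLAIM (what is proved, stated in full; the proofs are below) =====
def Claim_equal_known_plaintext_attack : Prop := ∀ (known_plaintext : String) (ciphertext : String) (key_length : Int), Dom_known_plaintext_attack known_plaintext ciphertext key_length → Spec_known_plaintext_attack known_plaintext ciphertext key_length (known_plaintext_attack known_plaintext ciphertext key_length)

-- ===== LEMMAS AND PROOFS =====

-- the indexed range comprehension over min-length equals the zip comprehension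
theorem pv_combined_eq (kp ct : List Char) (f : Char → Char → Int) :
    ((PySem.List.pyRange 0 ((min kp.length ct.length : Nat) : Int) 1).map
      (fun i => f (PySem.List.pyGetD ct i 'A') (PySem.List.pyGetD kp i 'A')))
    = (kp.zip ct).map (fun pc => f pc.2 pc.1) := by
  rw [PySem.List.pyRange_zero_nat, List.map_map]
  apply List.ext_getElem
  · simp
  · intro i h1 h2
    simp only [List.getElem_map, Function.comp_apply, List.getElem_range, List.getElem_zip,
      PySem.List.pyGetD_natCast]
    have hi : i < min kp.length ct.length := by simpa using h1
    rw [List.getD_eq_getElem ct 'A' (by omega), List.getD_eq_getElem kp 'A' (by omega)]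

theorem pv_slice_map {α β : Type} (f : α → β) (xs : List α) (a? b? : Option Int) :
    PySem.List.slice (xs.map f) a? b? = (PySem.List.slice xs a? b?).map f := by
  simp [PySem.List.slice, List.map_drop, List.map_take]

theorem pv_mod_self {x : Int} (h0 : 0 ≤ x) (h1 : x < 26) : PySem.Int.mod x 26 = x := by
  rw [PySem.Int.mod_eq_emod_of_pos (by norm_num)]; omega

theorem pv_shift_cancel (s : Int) {x : Int} (h0 : 0 ≤ x) (h1 : x < 26) :
    PySem.Int.mod (PySem.Int.mod (x - s) 26 + s) 26 = x := by
  rw [PySem.Int.mod_eq_emod_of_pos (by norm_num), PySem.Int.mod_eq_emod_of_pos (by norm_num)]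
  omega

-- shifting each residue by s is injective on lists of residues
theorem pv_map_shift_inj (s : Int) {l1 l2 : List Int}
    (h1 : ∀ x ∈ l1, 0 ≤ x ∧ x < 26) (h2 : ∀ x ∈ l2, 0 ≤ x ∧ x < 26)
    (h : l1.map (fun cs => PySem.Int.mod (cs - s) 26) = l2.map (fun cs => PySem.Int.mod (cs - s) 26)) :
    l1 = l2 := by
  have h' := congrArg (List.map (fun y => PySem.Int.mod (y + s) 26)) h
  simp only [List.map_map, Function.comp_def] at h'
  rwa [List.map_congr_left (fun x hx => pv_shift_cancel s (h1 x hx).1 (h1 x hx).2),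
       List.map_congr_left (fun x hx => pv_shift_cancel s (h2 x hx).1 (h2 x hx).2),
       List.map_id', List.map_id'] at h'

-- when the shift-0 condition fails, every iteration of A's loop fails
theorem pv_kpaLoop_fail (combined : List Int) (k : Int)
    (hb : ∀ x ∈ combined, 0 ≤ x ∧ x < 26)
    (hfail : ¬ ((combined.length : Int) ≥ 2 * k ∧
        PySem.List.slice combined none (some k) = PySem.List.slice combined (some k) (some (2 * k))))
    (ss : List Int) : kpaLoop combined k ss = (none, none) := by
  induction ss with
  | nil => rfl
  | cons s rest ih =>
    show kpaLoop combined k (s :: rest) = (none, none)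
    unfold kpaLoop
    simp only [List.length_map]
    split
    · exact ih
    · rename_i hlen
      rw [pv_slice_map, pv_slice_map]
      split
      · rename_i hseg
        exfalso
        apply hfail
        constructor
        · omega
        · rw [show k * 2 = 2 * k from mul_comm _ _] at hseg
          refine pv_map_shift_inj s ?_ ?_ hseg <;>
            exact fun x hx => hb x (PySem.List.mem_of_mem_slice _ _ _ hx)
      · exact ih

theorem known_plaintext_attack_spec' (known_plaintext ciphertext : String) (key_length : Int) :
    known_plaintext_attack known_plaintext ciphertext key_length
      = known_plaintext_attack_alt known_plaintext ciphertext key_length := by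
  unfold known_plaintext_attack known_plaintext_attack_alt
  simp only [PySem.Chars.upper]
  set kp := (known_plaintext.toList.filter PySem.Chars.isalpha).map PySem.Chars.upperChar with hkp
  set ct := (ciphertext.toList.filter PySem.Chars.isalpha).map PySem.Chars.upperChar with hct
  by_cases hempty : kp.length = 0 ∨ ct.length = 0
  · rw [if_pos hempty, if_pos]
    rcases hempty with h | h <;> simp [List.length_eq_zero_iff.mp h]
  · rw [if_neg hempty, if_neg (by
      simpa only [Bool.or_eq_true, List.isEmpty_iff, ← List.length_eq_zero_iff] using hempty)]
    rw [pv_combined_eq kp ct (fun c p => PySem.Int.mod ((c.toNat : Int) - (p.toNat : Int)) 26)]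
    set combined := (kp.zip ct).map
      (fun pc => PySem.Int.mod ((pc.2.toNat : Int) - (pc.1.toNat : Int)) 26) with hcomb
    have hb : ∀ x ∈ combined, 0 ≤ x ∧ x < 26 := by
      intro x hx
      rw [hcomb, List.mem_map] at hx
      obtain ⟨pc, _, rfl⟩ := hx
      exact ⟨PySem.Int.mod_nonneg _ (by norm_num), PySem.Int.mod_lt _ (by norm_num)⟩
    by_cases hcond : (combined.length : Int) ≥ 2 * key_length ∧
        PySem.List.slice combined none (some key_length)
          = PySem.List.slice combined (some key_length) (some (2 * key_length))
    · rw [if_pos hcond]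
      rw [show PySem.List.pyRange 0 26 1 = 0 :: PySem.List.pyRange 1 26 1 from
        PySem.List.pyRange_one_cons (by norm_num)]
      unfold kpaLoop
      have hid : combined.map (fun cs => PySem.Int.mod (cs - (0 : Int)) 26) = combined := by
        simp only [sub_zero]
        rw [List.map_congr_left (fun x hx => pv_mod_self (hb x hx).1 (hb x hx).2), List.map_id']
      simp only [hid]
      rw [if_neg (by omega), if_pos (by rw [show key_length * 2 = 2 * key_length from mul_comm _ _]; exact hcond.2)]
    · rw [if_neg hcond]
      exact pv_kpaLoop_fail combined key_length hb hcond _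

-- ===== VERDICT (by name: the statement is the Claim_ definition above) =====
theorem known_plaintext_attack_spec : Claim_equal_known_plaintext_attack := by
  intro kp ct k _
  exact known_plaintext_attack_spec' kp ct k
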